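-- pv_equiv track=rewrite | github.com/ghesio/AortaSegmentator | utils/data_locator.py | remove_everything_after_last
-- ===== SOURCE A (Python) =====
-- def remove_everything_after_last(haystack, needle='\\', n=1):
--     """
--     Remove everything after the n instance of a char in a string
--     :param haystack: the input string
--     :param needle: what to search
--     :param n: 1 last instance, 2 second-to-last, ecc.
--     :return: the manipulated string
--     """
--     while n > 0:
--         idx = haystack.rfind(needle)
--         if idx >= 0:
--             haystack = haystack[:idx]
--             n -= 1
--         else:
--             break
--     return haystack
-- ===== SOURCE B (Python) =====
-- def remove_everything_after_last(haystack, needle='\\', n=1):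
--     """
--     Remove everything after the n-th-from-last instance of needle.
--     Strategy: enumerate all (possibly overlapping) occurrence positions in one
--     left-to-right pass, then greedily pick up to n non-overlapping cut points
--     from the right; the answer is the prefix before the last picked position.
--     """
--     if needle == '':
--         return haystack
--     L = len(needle)
--     occ = [i for i in range(len(haystack) - L + 1) if haystack[i:i+L] == needle]
--     cut = len(haystack)
--     k = 0
--     for i in reversed(occ):
--         if n <= k:
--             break
--         if i + L <= cut:
--             cut = i
--             k += 1
--     return haystack[:cut]
-- ===== Notes on version B (the rewrite author's own statement) =====
-- stated objective: alternative
-- what changed: Instead of A's while-loop of repeated rfind + re-slice, B enumerates all occurrence positions once in a left-to-right pass and then greedily selects up to n non-overlapping cut points from the right, returning the prefix before the last selected one.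
import Mathlib
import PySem

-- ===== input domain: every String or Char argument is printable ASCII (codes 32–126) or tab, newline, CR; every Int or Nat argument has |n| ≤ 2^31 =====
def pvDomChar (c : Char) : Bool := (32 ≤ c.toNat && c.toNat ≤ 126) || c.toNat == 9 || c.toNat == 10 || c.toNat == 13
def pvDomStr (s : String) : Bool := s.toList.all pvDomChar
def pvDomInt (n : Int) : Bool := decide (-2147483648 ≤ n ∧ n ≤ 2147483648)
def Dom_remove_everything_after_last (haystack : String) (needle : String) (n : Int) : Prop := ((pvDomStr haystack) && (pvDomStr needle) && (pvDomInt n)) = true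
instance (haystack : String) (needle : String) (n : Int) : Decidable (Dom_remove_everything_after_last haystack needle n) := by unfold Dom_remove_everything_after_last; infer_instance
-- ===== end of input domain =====

-- B replaces A's repeated rfind/re-slice while-loop by one left-to-right occurrence
-- enumeration followed by a right-to-left greedy selection of at most n cut points
-- (objective: alternative); RETURN values only, no arguments are mutated.

-- ===== PORT A =====
-- the `while n > 0` loop of A: rfind, truncate, decrement; break when the needle is absent
def pvAWhile (needle : List Char) (hs : List Char) (n : Int) : List Char :=
  if _h : 0 < n then
    let idx := PySem.Chars.rfind hs needle
    if 0 ≤ idx then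
      pvAWhile needle (PySem.List.slice hs none (some idx)) (n - 1)
    else hs
  else hs
termination_by n.toNat
decreasing_by omega

def remove_everything_after_last (haystack : String) (needle : String) (n : Int) : String :=
  String.ofList (pvAWhile needle.toList haystack.toList n)

-- ===== PORT B =====
-- Source B's backward for-loop over the occurrence list: break once k reaches n,
-- take an occurrence as the new cut point only if it fits before the current cut
def pvSelect (L : Nat) (n : Int) : List Nat → Nat → Int → Nat
  | [], cut, _ => cut
  | i :: rest, cut, k =>
    if n ≤ k then cut
    else if i + L ≤ cut then pvSelect L n rest i (k + 1)
    else pvSelect L n rest cut k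

def remove_everything_after_last_alt (haystack : String) (needle : String) (n : Int) : String :=
  if needle == "" then haystack
  else
    let hs := haystack.toList
    let nd := needle.toList
    -- occ = [i for i in range(len(haystack) - L + 1) if haystack[i:i+L] == needle]
    let occ := (List.range (hs.length + 1 - nd.length)).filter
      (fun i => (hs.drop i).take nd.length == nd)
    let cut := pvSelect nd.length n occ.reverse hs.length 0
    String.ofList (hs.take cut)

-- ===== PRECONDITION & SPEC =====
def Spec_remove_everything_after_last (haystack : String) (needle : String) (n : Int) (out : String) : Prop := out = remove_everything_after_last_alt haystack needle n
instance (haystack : String) (needle : String) (n : Int) (out : String) : Decidable (Spec_remove_everything_after_last haystack needle n out) := by unfold Spec_remove_everything_after_last; infer_instance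

-- ===== CLAIM (what is proved, stated in full; the proofs are below) =====
def Claim_equal_remove_everything_after_last : Prop := ∀ (haystack : String) (needle : String) (n : Int), Dom_remove_everything_after_last haystack needle n → Spec_remove_everything_after_last haystack needle n (remove_everything_after_last haystack needle n)

-- ===== LEMMAS AND PROOFS =====

-- searching for the empty needle always finds it at the end of the string
theorem pv_rfind_nil (hs : List Char) : PySem.Chars.rfind hs [] = (hs.length : Int) := by
  show PySem.Chars.rfind.go hs [] hs.length = (hs.length : Int)
  cases h : hs.length with
  | zero => simp [PySem.Chars.rfind.go]
  | succ j => simp [PySem.Chars.rfind.go, List.isPrefixOf]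

-- A's loop is a no-op for the empty needle: it truncates at len(haystack) each round
theorem pvAWhile_nil (hs : List Char) (n : Int) : pvAWhile [] hs n = hs := by
  suffices H : ∀ (k : Nat) (n : Int), n.toNat = k → ∀ hs, pvAWhile [] hs n = hs from
    H n.toNat n rfl hs
  intro k
  induction k with
  | zero =>
      intro n hk hs
      rw [pvAWhile, dif_neg (by omega : ¬ 0 < n)]
  | succ k ih =>
      intro n hk hs
      rw [pvAWhile]
      by_cases h : 0 < n
      · simp only [dif_pos h, pv_rfind_nil]
        rw [if_pos (Int.natCast_nonneg hs.length), PySem.List.slice_to_natCast]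
        simp only [List.take_length]
        exact ih (n - 1) (by omega) hs
      · rw [dif_neg h]

-- rfind.go returns the highest occurrence at or below its counter
theorem pv_rfind_go_eq (s nd : List Char) (i : Nat) :
    ∀ m, i ≤ m → nd <+: s.drop i → (∀ j, i < j → j ≤ m → ¬ nd <+: s.drop j) →
    PySem.Chars.rfind.go s nd m = (i : Int) := by
  intro m
  induction m with
  | zero =>
      intro him hocc _
      have hi0 : i = 0 := Nat.le_zero.mp him
      subst hi0
      simpa [PySem.Chars.rfind.go, List.isPrefixOf_iff_prefix] using hocc
  | succ m ih =>
      intro him hocc hmax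
      show (if nd.isPrefixOf (List.drop (m + 1) s) = true then ((m + 1 : Nat) : Int)
            else PySem.Chars.rfind.go s nd m) = (i : Int)
      by_cases htop : nd <+: s.drop (m + 1)
      · have hieq : i = m + 1 := by
          by_contra hne
          exact hmax (m + 1) (by omega) (le_refl _) htop
        rw [if_pos (List.isPrefixOf_iff_prefix.mpr htop), hieq]
      · rw [if_neg (by simpa [List.isPrefixOf_iff_prefix] using htop)]
        have him' : i ≤ m := by
          by_contra hgt
          have hieq : i = m + 1 := by omega
          rw [hieq] at hocc
          exact htop hocc
        exact ih him' hocc (fun j h1 h2 => hmax j h1 (by omega))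

-- rfind.go returns -1 when there is no occurrence at or below its counter
theorem pv_rfind_go_none (s nd : List Char) :
    ∀ m, (∀ j, j ≤ m → ¬ nd <+: s.drop j) → PySem.Chars.rfind.go s nd m = -1 := by
  intro m
  induction m with
  | zero =>
      intro h
      simpa [PySem.Chars.rfind.go, List.isPrefixOf_iff_prefix] using h 0 (le_refl _)
  | succ m ih =>
      intro h
      show (if nd.isPrefixOf (List.drop (m + 1) s) = true then ((m + 1 : Nat) : Int)
            else PySem.Chars.rfind.go s nd m) = -1
      rw [if_neg (by simpa [List.isPrefixOf_iff_prefix] using h (m + 1) (le_refl _))]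
      exact ih (fun j hj => h j (by omega))

-- a prefix of take m is a prefix of the list itself, no longer than m; and conversely
theorem pv_prefix_take_iff (nd xs : List Char) (m : Nat) :
    nd <+: xs.take m ↔ nd <+: xs ∧ nd.length ≤ m := by
  constructor
  · intro h
    refine ⟨h.trans (List.take_prefix m xs), ?_⟩
    have := h.length_le
    simp only [List.length_take] at this
    omega
  · rintro ⟨h, hm⟩
    have heq := List.prefix_iff_eq_take.mp h
    refine List.prefix_iff_eq_take.mpr ?_
    rw [List.take_take, Nat.min_eq_left hm]
    exact heq

-- occurrence positions inside a truncated string, phrased on the full string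
theorem pv_occ_take (nd hs : List Char) (i cut : Nat) (hnd : nd ≠ []) :
    nd <+: (hs.take cut).drop i ↔ nd <+: hs.drop i ∧ i + nd.length ≤ cut := by
  rw [List.drop_take, pv_prefix_take_iff]
  have hL : 0 < nd.length := List.length_pos_iff.mpr hnd
  constructor
  · rintro ⟨h, hm⟩; exact ⟨h, by omega⟩
  · rintro ⟨h, hm⟩; exact ⟨h, by omega⟩

-- membership in B's occurrence list is exactly "needle occurs at i"
theorem pv_mem_occ (nd hs : List Char) (hnd : nd ≠ []) (i : Nat) :
    i ∈ (List.range (hs.length + 1 - nd.length)).filter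
        (fun i => (hs.drop i).take nd.length == nd) ↔ nd <+: hs.drop i := by
  have hL : 0 < nd.length := List.length_pos_iff.mpr hnd
  rw [List.mem_filter, List.mem_range]
  constructor
  · rintro ⟨hi, hp⟩
    have := beq_iff_eq.mp hp
    exact List.prefix_iff_eq_take.mpr this.symm
  · intro h
    have heq := (List.prefix_iff_eq_take.mp h).symm
    have hlen : nd.length ≤ (hs.drop i).length := by
      have := h.length_le; simpa using this
    simp only [List.length_drop] at hlen
    have hi : i ≤ hs.length := by
      by_contra hgt
      have : hs.drop i = [] := List.drop_eq_nil_of_le (by omega)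
      rw [this] at h
      exact hnd (List.prefix_nil.mp h)
    exact ⟨by omega, beq_iff_eq.mpr heq⟩

-- MAIN INVARIANT: B's backward greedy selection over a descending occurrence list
-- computes exactly the truncation point A's rfind loop reaches
theorem pv_main (nd hs : List Char) (hnd : nd ≠ []) :
    ∀ (d : List Nat) (cut : Nat) (n k : Int),
      cut ≤ hs.length →
      d.Pairwise (· > ·) →
      (∀ i ∈ d, nd <+: hs.drop i) →
      (∀ i, nd <+: hs.drop i → i + nd.length ≤ cut → i ∈ d) →
      pvAWhile nd (hs.take cut) (n - k) = hs.take (pvSelect nd.length n d cut k) := by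
  have hL : 0 < nd.length := List.length_pos_iff.mpr hnd
  intro d
  induction d with
  | nil =>
      intro cut n k hcut _ _ hcompl
      show pvAWhile nd (hs.take cut) (n - k) = hs.take cut
      rw [pvAWhile]
      by_cases hpos : 0 < n - k
      · rw [dif_pos hpos]
        have hnone : PySem.Chars.rfind (hs.take cut) nd = -1 := by
          refine pv_rfind_go_none (hs.take cut) nd _ (fun j _ hj => ?_)
          rcases (pv_occ_take nd hs j cut hnd).mp hj with ⟨hocc, hle⟩
          exact absurd (hcompl j hocc hle) (List.not_mem_nil)
        rw [hnone]
        norm_num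
      · rw [dif_neg hpos]
  | cons i rest ih =>
      intro cut n k hcut hpair helem hcompl
      by_cases hnk : n ≤ k
      · show pvAWhile nd (hs.take cut) (n - k) = hs.take (pvSelect nd.length n (i :: rest) cut k)
        rw [pvSelect, if_pos hnk, pvAWhile, dif_neg (by omega : ¬ 0 < n - k)]
      · have hocc_i : nd <+: hs.drop i := helem i (List.mem_cons_self)
        have hpair' : rest.Pairwise (· > ·) := hpair.of_cons
        have hgt : ∀ j ∈ rest, j < i := fun j hj => List.rel_of_pairwise_cons hpair hj
        by_cases hic : i + nd.length ≤ cut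
        · -- i is the rightmost occurrence inside take cut: A cuts exactly there
          show pvAWhile nd (hs.take cut) (n - k) = hs.take (pvSelect nd.length n (i :: rest) cut k)
          rw [pvSelect, if_neg hnk, if_pos hic]
          have hfind : PySem.Chars.rfind (hs.take cut) nd = (i : Int) := by
            refine pv_rfind_go_eq (hs.take cut) nd i _ ?_ ?_ ?_
            · simp only [List.length_take]; omega
            · exact (pv_occ_take nd hs i cut hnd).mpr ⟨hocc_i, hic⟩
            · intro j h1 _ hj
              rcases (pv_occ_take nd hs j cut hnd).mp hj with ⟨hocc, hle⟩
              rcases List.mem_cons.mp (hcompl j hocc hle) with hji | hji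
              · omega
              · exact absurd (hgt j hji) (by omega)
          rw [pvAWhile, dif_pos (by omega : 0 < n - k), hfind,
              if_pos (Int.natCast_nonneg i), PySem.List.slice_to_natCast,
              List.take_take, Nat.min_eq_left (by omega : i ≤ cut)]
          have := ih i n (k + 1) (by omega) hpair'
            (fun j hj => helem j (List.mem_cons_of_mem _ hj))
            (fun j hocc hle => by
              rcases List.mem_cons.mp (hcompl j hocc (by omega)) with hji | hji
              · omega
              · exact hji)
          rw [show n - k - 1 = n - (k + 1) by ring]
          exact this
        · -- i does not fit before cut any more: B skips it, A never saw it
          show pvAWhile nd (hs.take cut) (n - k) = hs.take (pvSelect nd.length n (i :: rest) cut k)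
          rw [pvSelect, if_neg hnk, if_neg hic]
          exact ih cut n k hcut hpair'
            (fun j hj => helem j (List.mem_cons_of_mem _ hj))
            (fun j hocc hle => by
              rcases List.mem_cons.mp (hcompl j hocc hle) with hji | hji
              · omega
              · exact hji)

-- ===== VERDICT (by name: the statement is the Claim_ definition above) =====
theorem remove_everything_after_last_spec : Claim_equal_remove_everything_after_last := by
  intro haystack needle n _
  unfold Spec_remove_everything_after_last
  unfold remove_everything_after_last remove_everything_after_last_alt
  by_cases h0 : needle == ""
  · rw [if_pos h0]
    have : needle = "" := by simpa using h0
    subst this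
    rw [show ("" : String).toList = [] from rfl, pvAWhile_nil]
    exact String.ofList_toList
  · rw [if_neg h0]
    have hnd : needle.toList ≠ [] := by
      intro h
      exact h0 (by simpa using congrArg String.ofList h)
    congr 1
    have := pv_main needle.toList haystack.toList hnd
      ((List.range (haystack.toList.length + 1 - needle.toList.length)).filter
        (fun i => (haystack.toList.drop i).take needle.toList.length == needle.toList)).reverse
      haystack.toList.length n 0 (le_refl _)
      (by
        rw [List.pairwise_reverse]
        exact ((List.pairwise_lt_range).filter _).imp (fun h => h))
      (fun i hi => (pv_mem_occ needle.toList haystack.toList hnd i).mp (List.mem_reverse.mp hi))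
      (fun i hocc _ => List.mem_reverse.mpr ((pv_mem_occ needle.toList haystack.toList hnd i).mpr hocc))
    rw [show n - 0 = n by ring, List.take_length] at this
    exact this
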